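-- pv_equiv track=rewrite | github.com/bboychencan/Algorithm | google/codejam/2020/qual_round/nestingdepth.py | peel
-- ===== SOURCE A (Python) =====
-- def peel(s, dep):
--     if s == "": return s
--     mini = int(min(s))
--     dep += mini
--     temp = "".join([str(int(s[i]) - mini) for i in range(len(s))])
--     arr = temp.split('0')
--     for i in range(len(arr)):
--         arr[i] = peel(arr[i], dep)
--     res = "(" * mini + str(dep).join(arr) + ")" * mini
--     return res
-- ===== SOURCE B (Python) =====
-- def peel(s, dep):
--     cur = 0
--     parts = []
--     for ch in s:
--         d = int(ch)
--         if d > cur: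
--             parts.append("(" * (d - cur))
--         elif d < cur:
--             parts.append(")" * (cur - d))
--         parts.append(str(d + dep))
--         cur = d
--     parts.append(")" * cur)
--     return "".join(parts)
-- ===== Notes on version B (the rewrite author's own statement) =====
-- stated objective: simpler
-- what changed: A recursively subtracts the minimum digit, rebuilds a string, splits it on '0' and recurses on each piece; B is a single left-to-right pass that tracks the current nesting depth, emitting '('/')' runs for depth changes and str(d+dep) for each digit.
import Mathlib
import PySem

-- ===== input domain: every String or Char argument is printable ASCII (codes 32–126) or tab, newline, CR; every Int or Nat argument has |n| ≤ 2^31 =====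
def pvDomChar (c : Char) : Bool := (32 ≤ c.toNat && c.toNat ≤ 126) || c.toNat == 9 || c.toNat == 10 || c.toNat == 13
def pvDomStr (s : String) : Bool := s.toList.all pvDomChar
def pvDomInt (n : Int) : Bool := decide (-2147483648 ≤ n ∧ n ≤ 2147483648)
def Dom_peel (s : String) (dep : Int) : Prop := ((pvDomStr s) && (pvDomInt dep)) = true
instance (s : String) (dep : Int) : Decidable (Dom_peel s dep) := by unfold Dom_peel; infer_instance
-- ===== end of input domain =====

-- B replaces A's subtract-min / split-on-'0' recursion by a single pass tracking the current depth.

-- ===== PORT A =====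
-- literal port of A's recursion; the fuel argument only makes the recursion
-- structurally terminating (it is never exhausted on inputs satisfying Pre_peel)
def peelA : Nat → String → Int → String
  | 0, _, _ => ""          -- fuel guard only
  | Nat.succ fuel, s, dep =>
    if s = "" then s
    else
      match PySem.List.min? s.toList (fun c => c) with
      | none => ""          -- unreachable: s ≠ ""
      | some mc =>
        match PySem.Int.ofChars? [mc] with
        | none => ""        -- int(min(s)) raises ValueError in Python (excluded by Pre_peel)
        | some mini =>
          let dep2 := dep + mini
          match s.toList.mapM (fun c => PySem.Int.ofChars? [c]) with
          | none => ""      -- some int(s[i]) raises ValueError (excluded by Pre_peel)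
          | some ds =>
            let temp : String := PySem.Str.join "" (ds.map (fun d => PySem.Int.toStr (d - mini)))
            match PySem.Str.split? temp "0" with
            | none => ""    -- unreachable: separator "0" is nonempty
            | some arr =>
              let arr := arr.map (fun t => peelA fuel t dep2)
              String.ofList (List.replicate mini.toNat '(')
                ++ PySem.Str.join (PySem.Int.toStr dep2) arr
                ++ String.ofList (List.replicate mini.toNat ')')

def peel (s : String) (dep : Int) : String := peelA (s.toList.length + 1) s dep

-- ===== PORT B =====
-- one step of B's loop: state = (current depth, reversed list of output parts);
-- none = a ValueError was raised by int(ch)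
def pbStep (dep : Int) (st : Option (Int × List String)) (ch : Char) : Option (Int × List String) :=
  match st with
  | none => none
  | some (cur, parts) =>
    match PySem.Int.ofChars? [ch] with
    | none => none          -- int(ch) raises ValueError (excluded by Pre_peel)
    | some d =>
      let parts := if cur < d then String.ofList (List.replicate (d - cur).toNat '(') :: parts
                   else if d < cur then String.ofList (List.replicate (cur - d).toNat ')') :: parts
                   else parts
      some (d, PySem.Int.toStr (d + dep) :: parts)

def peel_alt (s : String) (dep : Int) : String :=
  match s.toList.foldl (pbStep dep) (some (0, [])) with
  | none => ""              -- a non-digit character (excluded by Pre_peel)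
  | some (cur, parts) =>
      PySem.Str.join "" ((String.ofList (List.replicate cur.toNat ')') :: parts).reverse)

-- ===== PRECONDITION & SPEC =====
-- Pre_peel: exactly the inputs on which the Python A returns: every character of s is a
-- decimal digit (on any other character int() raises ValueError).
def Pre_peel (s : String) (dep : Int) : Prop := (s.toList.all Char.isDigit) = true
instance (s : String) (dep : Int) : Decidable (Pre_peel s dep) := by unfold Pre_peel; infer_instance

def pvWitness_peel : String × Int := ("120", 0)

def Spec_peel (s : String) (dep : Int) (out : String) : Prop := out = peel_alt s dep
instance (s : String) (dep : Int) (out : String) : Decidable (Spec_peel s dep out) := by unfold Spec_peel; infer_instance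

-- ===== CLAIM (what is proved, stated in full; the proofs are below) =====
def Claim_equal_peel : Prop := ∀ (s : String) (dep : Int), Dom_peel s dep → Pre_peel s dep → Spec_peel s dep (peel s dep)

-- ===== LEMMAS AND PROOFS =====

-- digit value of a digit character, and the digit character of e ∈ [0,9]
def valc (c : Char) : Int := (c.toNat : Int) - 48
def dChar (e : Int) : Char := Char.ofNat (48 + e.toNat)

-- the common functional core: B's one-pass output for a list of digit VALUES,
-- given the running depth cur and the offset dep
def gfun (dep : Int) : Int → List Int → List Char
  | cur, [] => List.replicate cur.toNat ')'
  | cur, d :: t =>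
      (if cur < d then List.replicate (d - cur).toNat '('
       else List.replicate (cur - d).toNat ')')
        ++ PySem.Int.toChars (d + dep) ++ gfun dep d t

-- reference recursion for Python's split('0') on character lists
def splitC (sep : Char) : List Char → List (List Char)
  | [] => [[]]
  | a :: t =>
    if a = sep then [] :: splitC sep t
    else match splitC sep t with
         | [] => [[a]]          -- unreachable: splitC never returns []
         | p :: ps => (a :: p) :: ps

-- output of B's state after the loop
def bOut (st : Option (Int × List String)) : List Char :=
  match st with
  | none => []
  | some (cur, parts) =>
      (((String.ofList (List.replicate cur.toNat ')')) :: parts).reverse.map String.toList).flatten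

-- ---------- digit characters ----------

lemma isdig_mem {c : Char} (h : '0' ≤ c ∧ c ≤ '9') :
    c ∈ ['0','1','2','3','4','5','6','7','8','9'] := by
  obtain ⟨b1, b2⟩ := h
  rw [Char.le_def] at b1 b2
  have b1' : 48 ≤ c.toNat := b1
  have b2' : c.toNat ≤ 57 := b2
  have hc : Char.ofNat c.toNat = c := Char.ofNat_toNat c
  interval_cases h : c.toNat <;> rw [← hc] <;> decide

lemma ofChars_digit {c : Char} (h : '0' ≤ c ∧ c ≤ '9') :
    PySem.Int.ofChars? [c] = some (valc c) := by
  have h10 := isdig_mem h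
  fin_cases h10 <;> decide

lemma valc_bounds {c : Char} (h : '0' ≤ c ∧ c ≤ '9') : 0 ≤ valc c ∧ valc c ≤ 9 := by
  have h10 := isdig_mem h
  fin_cases h10 <;> decide

lemma toChars_digit {e : Int} (h0 : 0 ≤ e) (h9 : e ≤ 9) :
    PySem.Int.toChars e = [dChar e] := by
  interval_cases e <;> decide

lemma dChar_isdig {e : Int} (h0 : 0 ≤ e) (h9 : e ≤ 9) : '0' ≤ dChar e ∧ dChar e ≤ '9' := by
  interval_cases e <;> exact ⟨by decide, by decide⟩

lemma valc_dChar {e : Int} (h0 : 0 ≤ e) (h9 : e ≤ 9) : valc (dChar e) = e := by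
  interval_cases e <;> decide

lemma dChar_zero : dChar 0 = '0' := by decide

lemma valc_le_valc {c d : Char} (h : c ≤ d) : valc c ≤ valc d := by
  rw [Char.le_def] at h
  have : c.toNat ≤ d.toNat := h
  simp only [valc]
  omega

lemma isDigit_le {c : Char} (h : c.isDigit = true) : '0' ≤ c ∧ c ≤ '9' := by
  simp only [Char.isDigit, Bool.and_eq_true, decide_eq_true_eq] at h
  obtain ⟨h1, h2⟩ := h
  exact ⟨Char.le_def.mpr h1, Char.le_def.mpr h2⟩

-- ---------- Python split('0') ----------

lemma splitC_ne_nil (sep : Char) (l : List Char) : splitC sep l ≠ [] := by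
  cases l with
  | nil => simp [splitC]
  | cons a t =>
    simp only [splitC]
    split
    · simp
    · split <;> simp

lemma splitOn_go_spec (c : Char) :
    ∀ (fuel : Nat) (l cur : List Char) (acc : List (List Char)), l.length < fuel →
    PySem.Chars.splitOn.go [c] fuel l cur acc =
      acc.reverse ++ (match splitC c l with
                      | [] => []
                      | p :: ps => (cur.reverse ++ p) :: ps) := by
  intro fuel
  induction fuel with
  | zero => intro l cur acc h; omega
  | succ n ih =>
    intro l cur acc h
    cases l with
    | nil => simp [PySem.Chars.splitOn.go, splitC]
    | cons a t =>
      simp only [PySem.Chars.splitOn.go]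
      by_cases hac : a = c
      · subst hac
        have hpre : List.isPrefixOf [a] (a :: t) = true := by
          simp [List.isPrefixOf]
        rw [if_pos hpre]
        have hrec := ih t [] (cur.reverse :: acc)
          (by simpa using Nat.lt_of_succ_lt_succ (by simpa using h))
        simp only [List.length_cons, List.length_nil, List.drop_succ_cons,
          List.drop_zero] at hrec ⊢
        rw [hrec]
        simp only [splitC]
        cases hs : splitC a t with
        | nil => exact absurd hs (splitC_ne_nil a t)
        | cons p ps => simp
      · have hpre : List.isPrefixOf [c] (a :: t) = false := by
          simp [List.isPrefixOf]
          intro hh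
          exact absurd hh.symm hac
        rw [if_neg (by simp [hpre])]
        rw [ih t (a :: cur) acc (by simpa using Nat.lt_of_succ_lt_succ (by simpa using h))]
        simp only [splitC, if_neg hac]
        cases hs : splitC c t with
        | nil => exact absurd hs (splitC_ne_nil c t)
        | cons p ps => simp

lemma chars_splitOn_eq (c : Char) (l : List Char) :
    PySem.Chars.splitOn l [c] = splitC c l := by
  unfold PySem.Chars.splitOn
  rw [splitOn_go_spec c (l.length + 1) l [] [] (by omega)]
  cases hs : splitC c l with
  | nil => exact absurd hs (splitC_ne_nil c l)
  | cons p ps => simp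

lemma splitC_sub (sep : Char) :
    ∀ (l : List Char), ∀ p ∈ splitC sep l, ∀ x ∈ p, x ∈ l := by
  intro l
  induction l with
  | nil => intro p hp x hx; simp [splitC] at hp; subst hp; simp at hx
  | cons a t ih =>
    intro p hp x hx
    simp only [splitC] at hp
    by_cases hac : a = sep
    · rw [if_pos hac] at hp
      rw [List.mem_cons] at hp
      rcases hp with hp | hp
      · subst hp; simp at hx
      · exact List.mem_cons_of_mem a (ih p hp x hx)
    · rw [if_neg hac] at hp
      cases hs : splitC sep t with
      | nil => exact absurd hs (splitC_ne_nil sep t)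
      | cons q qs =>
        rw [hs] at hp
        rw [List.mem_cons] at hp
        rcases hp with hp | hp
        · subst hp
          rw [List.mem_cons] at hx
          rcases hx with hx | hx
          · simp [hx]
          · exact List.mem_cons_of_mem a (ih q (by rw [hs]; simp) x hx)
        · exact List.mem_cons_of_mem a (ih p (by rw [hs]; exact List.mem_cons_of_mem q hp) x hx)

lemma splitC_length_le (sep : Char) :
    ∀ (l : List Char), ∀ p ∈ splitC sep l, p.length ≤ l.length := by
  intro l
  induction l with
  | nil => intro p hp; simp [splitC] at hp; subst hp; simp
  | cons a t ih =>
    intro p hp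
    simp only [splitC] at hp
    by_cases hac : a = sep
    · rw [if_pos hac] at hp
      rw [List.mem_cons] at hp
      rcases hp with hp | hp
      · subst hp; simp
      · have := ih p hp; simp; omega
    · rw [if_neg hac] at hp
      cases hs : splitC sep t with
      | nil => exact absurd hs (splitC_ne_nil sep t)
      | cons q qs =>
        rw [hs] at hp
        rw [List.mem_cons] at hp
        rcases hp with hp | hp
        · subst hp
          have := ih q (by rw [hs]; simp)
          simp; omega
        · have := ih p (by rw [hs]; exact List.mem_cons_of_mem q hp); simp; omega

lemma splitC_length_lt (sep : Char) :
    ∀ (l : List Char), sep ∈ l → ∀ p ∈ splitC sep l, p.length < l.length := by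
  intro l
  induction l with
  | nil => intro h; simp at h
  | cons a t ih =>
    intro hsep p hp
    simp only [splitC] at hp
    by_cases hac : a = sep
    · rw [if_pos hac] at hp
      rw [List.mem_cons] at hp
      rcases hp with hp | hp
      · subst hp; simp
      · have := splitC_length_le sep t p hp; simp; omega
    · rw [if_neg hac] at hp
      have hsep' : sep ∈ t := by
        rw [List.mem_cons] at hsep
        rcases hsep with h | h
        · exact absurd h.symm hac
        · exact h
      cases hs : splitC sep t with
      | nil => exact absurd hs (splitC_ne_nil sep t)
      | cons q qs =>
        rw [hs] at hp
        rw [List.mem_cons] at hp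
        rcases hp with hp | hp
        · subst hp
          have := ih hsep' q (by rw [hs]; simp)
          simp; omega
        · have := ih hsep' p (by rw [hs]; exact List.mem_cons_of_mem q hp); simp; omega

-- ---------- join ----------

lemma intercalate_cons2 (sep x y : List Char) (ys : List (List Char)) :
    List.intercalate sep (x :: y :: ys) = x ++ sep ++ List.intercalate sep (y :: ys) := by
  simp [List.intercalate, List.intersperse]

lemma join_cons_flat (sep : List Char) (x : List Char) (xs : List (List Char)) :
    PySem.Chars.join sep (x :: xs) = x ++ (xs.map (fun q => sep ++ q)).flatten := by
  induction xs generalizing x with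
  | nil => simp [PySem.Chars.join, List.intercalate]
  | cons y ys ih =>
    show List.intercalate sep (x :: y :: ys) = _
    rw [intercalate_cons2]
    have := ih y
    simp only [PySem.Chars.join] at this
    rw [List.append_assoc, this]
    simp

lemma join_nil_sep (xss : List (List Char)) : PySem.Chars.join [] xss = xss.flatten := by
  cases xss with
  | nil => rfl
  | cons x xs => rw [join_cons_flat]; simp

-- ---------- mapM ----------

lemma mapM_digits (f : Char → Option Int) (g : Char → Int) :
    ∀ (l : List Char), (∀ c ∈ l, f c = some (g c)) → l.mapM f = some (l.map g) := by
  intro l h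
  induction l with
  | nil => rfl
  | cons a t ih =>
    rw [List.mapM_cons, h a (by simp), ih (fun c hc => h c (by simp [hc]))]
    rfl

-- ---------- gfun: shift and split laws ----------

lemma gfun_shift (dep m : Int) (hm : 0 ≤ m) :
    ∀ (es : List Int) (cur : Int), 0 ≤ cur → (∀ e ∈ es, 0 ≤ e) →
    gfun dep (cur + m) (es.map (· + m)) = gfun (dep + m) cur es ++ List.replicate m.toNat ')' := by
  intro es
  induction es with
  | nil =>
    intro cur hc _
    simp only [List.map_nil, gfun]
    rw [← List.replicate_add]
    congr 1
    omega
  | cons d t ih =>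
    intro cur hc hall
    have hd : 0 ≤ d := hall d (by simp)
    simp only [List.map_cons, gfun]
    rw [ih d hd (fun e he => hall e (by simp [he]))]
    have harg : d + m + dep = d + (dep + m) := by ring
    have h1 : d + m - (cur + m) = d - cur := by ring
    have h2 : cur + m - (d + m) = cur - d := by ring
    by_cases hcd : cur < d
    · rw [if_pos (by omega), if_pos hcd, harg, h1]
      simp [List.append_assoc]
    · rw [if_neg (by omega), if_neg hcd, harg, h2]
      simp [List.append_assoc]

lemma gfun_open (dep m : Int) (hm : 0 ≤ m) (d : Int) (hd : 0 ≤ d) (t : List Int)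
    (ht : ∀ e ∈ t, 0 ≤ e) :
    gfun dep 0 ((d :: t).map (· + m)) =
      List.replicate m.toNat '(' ++ gfun (dep + m) 0 (d :: t) ++ List.replicate m.toNat ')' := by
  have hsh := gfun_shift dep m hm t
  simp only [List.map_cons, gfun]
  rw [gfun_shift dep m hm t d hd ht]
  have harg : d + m + dep = d + (dep + m) := by ring
  rw [harg]
  by_cases hdp : 0 < d
  · rw [if_pos (by omega), if_pos hdp]
    have hrep : (d + m - 0).toNat = m.toNat + d.toNat := by omega
    have hd0 : d - 0 = d := by ring
    rw [hrep, hd0, List.replicate_add]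
    simp only [List.append_assoc]
  · have hd0 : d = 0 := by omega
    subst hd0
    by_cases hm0 : 0 < m
    · rw [if_pos (by omega), if_neg (by omega)]
      have h1 : (0 + m - 0).toNat = m.toNat := by omega
      have h2 : ((0 : Int) - 0).toNat = 0 := by omega
      rw [h1, h2]
      simp [List.append_assoc]
    · have : m = 0 := by omega
      subst this
      simp

lemma flatten_singletons {α β : Type} (f : α → β) :
    ∀ (l : List α), (l.map (fun x => [f x])).flatten = l.map f := by
  intro l
  induction l with
  | nil => rfl
  | cons a t ih => simp [ih]

lemma string_eq_of_toList {a : String} {l : List Char} (h : a.toList = l) :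
    a = String.ofList l := by
  rw [← h, String.ofList_toList]

lemma valc_zero : valc '0' = 0 := by decide

lemma gfun_split (dep : Int) :
    ∀ (l : List Char) (cur : Int) (p : List Char) (ps : List (List Char)),
    (∀ c ∈ l, '0' ≤ c ∧ c ≤ '9') → 0 ≤ cur → splitC '0' l = p :: ps →
    gfun dep cur (l.map valc) =
      gfun dep cur (p.map valc) ++
        (ps.map (fun q => PySem.Int.toChars dep ++ gfun dep 0 (q.map valc))).flatten := by
  intro l
  induction l with
  | nil =>
    intro cur p ps _ _ hsp
    simp only [splitC] at hsp
    injection hsp with hp hps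
    subst hp; subst hps
    simp
  | cons c t ih =>
    intro cur p ps hdig hcur hsp
    have hcdig : '0' ≤ c ∧ c ≤ '9' := hdig c (by simp)
    have htdig : ∀ x ∈ t, '0' ≤ x ∧ x ≤ '9' := fun x hx => hdig x (by simp [hx])
    obtain ⟨q, qs, hq⟩ : ∃ q qs, splitC '0' t = q :: qs := by
      cases hs : splitC '0' t with
      | nil => exact absurd hs (splitC_ne_nil '0' t)
      | cons q qs => exact ⟨q, qs, rfl⟩
    simp only [splitC] at hsp
    by_cases hc0 : c = '0'
    · rw [if_pos hc0, hq] at hsp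
      injection hsp with hp hps
      subst hc0
      rw [← hp, ← hps]
      have hrec := ih 0 q qs htdig le_rfl hq
      simp only [List.map_cons, gfun, valc_zero]
      rw [if_neg (by omega), hrec]
      simp [gfun, List.append_assoc]
    · rw [if_neg hc0, hq] at hsp
      obtain ⟨hp, hps⟩ := List.cons.injEq _ _ _ _ ▸ hsp
      have hv0 : 0 ≤ valc c := (valc_bounds hcdig).1
      have hrec := ih (valc c) q qs htdig hv0 hq
      rw [← hp, ← hps]
      simp only [List.map_cons, gfun]
      rw [hrec]
      simp [List.append_assoc]

lemma B_fold (dep : Int) :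
    ∀ (l : List Char) (cur : Int) (parts : List String),
    (∀ c ∈ l, '0' ≤ c ∧ c ≤ '9') → 0 ≤ cur →
    bOut (l.foldl (pbStep dep) (some (cur, parts))) =
      (parts.reverse.map String.toList).flatten ++ gfun dep cur (l.map valc) := by
  intro l
  induction l with
  | nil =>
    intro cur parts _ _
    simp [bOut, gfun, List.map_append]
  | cons c t ih =>
    intro cur parts hdig hcur
    have hcdig : '0' ≤ c ∧ c ≤ '9' := hdig c (by simp)
    have htdig : ∀ x ∈ t, '0' ≤ x ∧ x ≤ '9' := fun x hx => hdig x (by simp [hx])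
    have hv0 : 0 ≤ valc c := (valc_bounds hcdig).1
    simp only [List.foldl_cons, pbStep, ofChars_digit hcdig]
    rw [ih (valc c) _ htdig hv0]
    simp only [List.map_cons, gfun]
    by_cases h1 : cur < valc c
    · rw [if_pos h1, if_pos h1]
      simp [List.map_append, List.append_assoc, PySem.Int.toList_toStr]
    · rw [if_neg h1, if_neg h1]
      by_cases h2 : valc c < cur
      · rw [if_pos h2]
        simp [List.map_append, List.append_assoc, PySem.Int.toList_toStr]
      · rw [if_neg h2]
        have : cur - valc c = 0 := by omega
        rw [this]
        simp [List.map_append, List.append_assoc, PySem.Int.toList_toStr]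

lemma foldl_pbStep_some (dep : Int) :
    ∀ (l : List Char) (cur : Int) (parts : List String),
    (∀ c ∈ l, '0' ≤ c ∧ c ≤ '9') →
    ∃ c2 p2, l.foldl (pbStep dep) (some (cur, parts)) = some (c2, p2) := by
  intro l
  induction l with
  | nil => intro cur parts _; exact ⟨cur, parts, rfl⟩
  | cons c t ih =>
    intro cur parts hdig
    have hcdig : '0' ≤ c ∧ c ≤ '9' := hdig c (by simp)
    simp only [List.foldl_cons, pbStep, ofChars_digit hcdig]
    exact ih _ _ (fun x hx => hdig x (by simp [hx]))

lemma B_eq (s : String) (dep : Int) (h : ∀ c ∈ s.toList, '0' ≤ c ∧ c ≤ '9') :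
    peel_alt s dep = String.ofList (gfun dep 0 (s.toList.map valc)) := by
  obtain ⟨c2, p2, hst⟩ := foldl_pbStep_some dep s.toList 0 [] h
  have hb := B_fold dep s.toList 0 [] h le_rfl
  rw [hst] at hb
  unfold peel_alt
  rw [hst]
  apply string_eq_of_toList
  rw [PySem.Str.toList_join]
  have : ("" : String).toList = [] := rfl
  rw [this, join_nil_sep]
  simpa [bOut] using hb

lemma A_eq : ∀ (n : Nat) (s : String) (dep : Int), s.toList.length < n →
    (∀ c ∈ s.toList, '0' ≤ c ∧ c ≤ '9') →
    peelA n s dep = String.ofList (gfun dep 0 (s.toList.map valc)) := by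
  intro n
  induction n with
  | zero => intro s dep h _; omega
  | succ n ih =>
    intro s dep hlen hdig
    by_cases hs : s = ""
    · subst hs
      have h0 : ("" : String).toList = [] := rfl
      simp only [peelA, h0, List.map_nil, gfun]
      rfl
    · have hl : s.toList ≠ [] := by simp [String.toList_eq_nil_iff, hs]
      obtain ⟨c, t, hcl⟩ : ∃ c t, s.toList = c :: t := by
        cases hcl : s.toList with
        | nil => exact absurd hcl hl
        | cons c t => exact ⟨c, t, rfl⟩
      have hdig' : ∀ x ∈ c :: t, '0' ≤ x ∧ x ≤ '9' := by rw [hcl] at hdig; exact hdig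
      have hcdig : '0' ≤ c ∧ c ≤ '9' := hdig' c (by simp)
      -- the minimum character and its value
      have hmcmem : List.foldl min c t ∈ c :: t := by
        rcases PySem.List.foldl_min_mem t c with h | h
        · rw [h]; simp
        · simp [h]
      have hmcdig : '0' ≤ List.foldl min c t ∧ List.foldl min c t ≤ '9' := hdig' _ hmcmem
      set mc := List.foldl min c t with hmcdef
      set m := valc mc with hmdef
      obtain ⟨hm0, -⟩ := valc_bounds hmcdig
      have hminle : ∀ x ∈ c :: t, m ≤ valc x := by
        intro x hx
        apply valc_le_valc
        rw [List.mem_cons] at hx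
        rcases hx with hx | hx
        · rw [hx]; exact (PySem.List.foldl_min_le t c).1
        · exact (PySem.List.foldl_min_le t c).2 x hx
      simp only [peelA]
      rw [if_neg hs, hcl, PySem.List.min?_id_cons, ← hmcdef]
      dsimp only
      rw [ofChars_digit hmcdig, ← hmdef]
      dsimp only
      rw [mapM_digits _ valc (c :: t) (fun x hx => ofChars_digit (hdig' x hx))]
      dsimp only
      -- the relative (min-subtracted) digit characters of temp
      have hbound : ∀ x ∈ c :: t, 0 ≤ valc x - m ∧ valc x - m ≤ 9 := by
        intro x hx
        have h1 := hminle x hx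
        have h2 := (valc_bounds (hdig' x hx)).2
        omega
      have htemp : (PySem.Str.join ""
            (List.map (fun d => PySem.Int.toStr (d - m)) (List.map valc (c :: t)))).toList
          = (c :: t).map (fun x => dChar (valc x - m)) := by
        rw [PySem.Str.toList_join]
        have h0 : ("" : String).toList = [] := rfl
        rw [h0, join_nil_sep]
        simp only [List.map_map]
        have hpt : ∀ x ∈ c :: t,
            (String.toList ∘ (fun d => PySem.Int.toStr (d - m)) ∘ valc) x
              = [dChar (valc x - m)] := by
          intro x hx
          show (PySem.Int.toStr (valc x - m)).toList = _
          rw [PySem.Int.toList_toStr, toChars_digit (hbound x hx).1 (hbound x hx).2]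
        rw [List.map_congr_left hpt, flatten_singletons (fun x => dChar (valc x - m))]
      have hsplit : PySem.Str.split?
            (PySem.Str.join "" (List.map (fun d => PySem.Int.toStr (d - m)) (List.map valc (c :: t)))) "0"
          = some ((splitC '0' ((c :: t).map (fun x => dChar (valc x - m)))).map String.ofList) := by
        unfold PySem.Str.split? PySem.Chars.split?
        rw [htemp]
        have h1 : ("0" : String).toList = ['0'] := rfl
        rw [h1]
        simp [chars_splitOn_eq]
      rw [hsplit]
      dsimp only
      set lc := (c :: t).map (fun x => dChar (valc x - m)) with hlcdef
      obtain ⟨p, ps, hpq⟩ : ∃ p ps, splitC '0' lc = p :: ps := by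
        cases hq : splitC '0' lc with
        | nil => exact absurd hq (splitC_ne_nil '0' lc)
        | cons p ps => exact ⟨p, ps, rfl⟩
      have hlcdig : ∀ x ∈ lc, '0' ≤ x ∧ x ≤ '9' := by
        intro x hx
        rw [hlcdef, List.mem_map] at hx
        obtain ⟨y, hy, rfl⟩ := hx
        exact dChar_isdig (hbound y hy).1 (hbound y hy).2
      have hzero : '0' ∈ lc := by
        rw [hlcdef, List.mem_map]
        refine ⟨mc, hmcmem, ?_⟩
        rw [← hmdef, sub_self]
        exact dChar_zero
      have hlclen : lc.length = t.length + 1 := by simp [hlcdef]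
      have hlenn : lc.length ≤ n := by
        rw [hcl] at hlen
        simp only [List.length_cons] at hlen
        omega
      have harr : List.map (fun t' => peelA n t' (dep + m)) ((splitC '0' lc).map String.ofList)
          = (splitC '0' lc).map (fun q => String.ofList (gfun (dep + m) 0 (q.map valc))) := by
        rw [List.map_map]
        apply List.map_congr_left
        intro q hq
        show peelA n (String.ofList q) (dep + m) = _
        rw [ih (String.ofList q) (dep + m)
            (by rw [String.toList_ofList]
                exact lt_of_lt_of_le (splitC_length_lt '0' lc hzero q hq) hlenn)
            (by rw [String.toList_ofList]
                intro x hx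
                exact hlcdig x (splitC_sub '0' lc q hq x hx))]
        rw [String.toList_ofList]
      rw [harr, hpq]
      -- both sides as character lists
      apply string_eq_of_toList
      rw [String.toList_append, String.toList_append, String.toList_ofList, String.toList_ofList]
      rw [PySem.Str.toList_join, PySem.Int.toList_toStr]
      simp only [List.map_cons, List.map_map]
      rw [join_cons_flat]
      -- now rewrite the right-hand side
      have hvals : valc c :: List.map valc t
          = ((valc c - m) :: t.map (fun x => valc x - m)).map (· + m) := by
        simp only [List.map_cons, List.map_map]
        have h1 : valc c - m + m = valc c := by ring
        rw [h1]
        congr 1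
        symm
        apply List.map_congr_left
        intro x _
        show valc x - m + m = valc x
        ring
      have hes : (valc c - m) :: t.map (fun x => valc x - m) = lc.map valc := by
        rw [hlcdef, List.map_map, List.map_cons]
        congr 1
        · exact (valc_dChar (hbound c (by simp)).1 (hbound c (by simp)).2).symm
        · symm
          apply List.map_congr_left
          intro x hx
          exact valc_dChar (hbound x (by simp [hx])).1 (hbound x (by simp [hx])).2
      rw [hvals, gfun_open dep m hm0 (valc c - m) (hbound c (by simp)).1
            (t.map (fun x => valc x - m))
            (by intro e he
                rw [List.mem_map] at he
                obtain ⟨y, hy, rfl⟩ := he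
                exact (hbound y (by simp [hy])).1)]
      rw [hes, gfun_split (dep + m) lc 0 p ps hlcdig le_rfl hpq]
      simp [Function.comp_def, String.toList_ofList]

theorem peel_spec : Claim_equal_peel := by
  intro s dep hdom hpre
  unfold Spec_peel
  show peel s dep = peel_alt s dep
  have hdig : ∀ c ∈ s.toList, '0' ≤ c ∧ c ≤ '9' := by
    intro c hc
    have hall : s.toList.all Char.isDigit = true := hpre
    exact isDigit_le ((List.all_eq_true.mp hall) c hc)
  unfold peel
  rw [A_eq (s.toList.length + 1) s dep (by omega) hdig, B_eq s dep hdig]
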